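-- pv_equiv track=rewrite | github.com/afaiyaz006/usaco | graph/fence_planing.py | bfs
-- ===== SOURCE A (Python) =====
-- from collections import deque
--
-- def bfs(graph,
--         start_node,
--         visited,
--         cow_pos
--         ):
--     q=deque()
--     q.append(start_node)
--     x1=cow_pos[start_node-1][0]
--     y1=cow_pos[start_node-1][1]
--     x2=cow_pos[start_node-1][0]
--     y2=cow_pos[start_node-1][1]
--
--     visited[start_node]=True
--     while q:
--         node=q.popleft()
--
--         for u in graph[node]:
--             if not visited[u]:
--                 visited[u]=True
--                 x1=min(x1,cow_pos[u-1][0])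
--                 y1=min(y1,cow_pos[u-1][1])
--                 x2=max(x2,cow_pos[u-1][0])
--                 y2=max(y2,cow_pos[u-1][1])
--                 q.append(u)
--
--
--     return 2*(x2-x1)+2*(y2-y1)
-- ===== SOURCE B (Python) =====
-- def bfs(graph, start_node, visited, cow_pos):
--     # Fixpoint label propagation (no queue/worklist): repeatedly sweep over a
--     # snapshot of the reached set, extending it one adjacency hop per sweep,
--     # until a sweep changes nothing; then take the bounding box of the component.
--     visited[start_node] = True
--     reached = {start_node}
--     comp = [start_node]
--     changed = True
--     while changed:
--         changed = False
--         for node in list(reached):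
--             for u in graph[node]:
--                 if not visited[u]:
--                     visited[u] = True
--                     reached.add(u)
--                     comp.append(u)
--                     changed = True
--     xs = [cow_pos[u - 1][0] for u in comp]
--     ys = [cow_pos[u - 1][1] for u in comp]
--     return 2 * (max(xs) - min(xs)) + 2 * (max(ys) - min(ys))
-- ===== Notes on version B (the rewrite author's own statement) =====
-- stated objective: alternative
-- what changed: Replaces A's deque-driven BFS worklist with running min/max accumulators by queue-free fixpoint label propagation: repeated full sweeps over a snapshot of the reached set extend it one adjacency hop per sweep until a sweep changes nothing, and the bounding box is computed afterwards over the collected component.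
import Mathlib
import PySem

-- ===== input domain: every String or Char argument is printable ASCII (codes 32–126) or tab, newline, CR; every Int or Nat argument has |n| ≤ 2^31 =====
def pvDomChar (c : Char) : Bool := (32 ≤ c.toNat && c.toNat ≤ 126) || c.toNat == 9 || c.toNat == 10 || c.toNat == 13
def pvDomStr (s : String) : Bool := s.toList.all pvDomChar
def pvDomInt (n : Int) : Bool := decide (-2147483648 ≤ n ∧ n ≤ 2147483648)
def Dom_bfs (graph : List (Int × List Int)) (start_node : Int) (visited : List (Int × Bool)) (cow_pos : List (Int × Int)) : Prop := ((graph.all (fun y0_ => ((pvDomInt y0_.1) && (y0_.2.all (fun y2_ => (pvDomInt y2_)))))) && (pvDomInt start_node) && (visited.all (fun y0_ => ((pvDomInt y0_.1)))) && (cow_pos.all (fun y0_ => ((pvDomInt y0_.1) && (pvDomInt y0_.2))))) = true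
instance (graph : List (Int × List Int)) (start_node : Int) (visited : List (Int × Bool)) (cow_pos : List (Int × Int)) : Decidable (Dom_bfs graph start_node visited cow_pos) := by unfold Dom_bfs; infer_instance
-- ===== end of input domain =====

-- B replaces A's deque-driven BFS (running min/max folded in at mark time) by queue-free
-- fixpoint label propagation: repeated sweeps over a snapshot of the reached set extend it
-- one hop at a time until a sweep changes nothing, then the bounding box is taken over the
-- collected component (alternative decomposition). Both A and B set the same visited keys
-- True (possibly in a different order); the equivalence proved is about the return value.

-- ===== PORT A =====
def bfsStepA (cow_pos : List (Int × Int))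
    (s : PySem.Dict Int Bool × (Int × Int × Int × Int) × List Int) (u : Int) :
    PySem.Dict Int Bool × (Int × Int × Int × Int) × List Int :=
  if s.1.getD u true then s
  else
    let p := (PySem.List.pyGet? cow_pos (u - 1)).getD (0, 0)
    (s.1.insert u true,
      (min s.2.1.1 p.1, min s.2.1.2.1 p.2, max s.2.1.2.2.1 p.1, max s.2.1.2.2.2 p.2),
      s.2.2 ++ [u])

def bfsLoopA (g : PySem.Dict Int (List Int)) (cow_pos : List (Int × Int)) :
    Nat → List Int → PySem.Dict Int Bool → Int × Int × Int × Int → Int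
  | 0, _, _, a => 2 * (a.2.2.1 - a.1) + 2 * (a.2.2.2 - a.2.1)
  | _ + 1, [], _, a => 2 * (a.2.2.1 - a.1) + 2 * (a.2.2.2 - a.2.1)
  | f + 1, node :: rest, vis, a =>
      let s := (g.getD node []).foldl (bfsStepA cow_pos) (vis, a, rest)
      bfsLoopA g cow_pos f s.2.2 s.1 s.2.1

def bfs (graph : List (Int × List Int)) (start_node : Int) (visited : List (Int × Bool)) (cow_pos : List (Int × Int)) : Int :=
  let g := PySem.Dict.ofList graph
  let p := (PySem.List.pyGet? cow_pos (start_node - 1)).getD (0, 0)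
  let vis := (PySem.Dict.ofList visited).insert start_node true
  bfsLoopA g cow_pos ((graph.flatMap (fun e => e.2)).length + 2) [start_node] vis (p.1, p.2, p.1, p.2)

-- ===== PORT B =====
-- state: (visited dict, reached set, comp list, changed flag)
def bInner (s : PySem.Dict Int Bool × List Int × List Int × Bool) (u : Int) :
    PySem.Dict Int Bool × List Int × List Int × Bool :=
  if s.1.getD u true then s
  else (s.1.insert u true, PySem.Set.add s.2.1 u, s.2.2.1 ++ [u], true)

def bNode (g : PySem.Dict Int (List Int))
    (s : PySem.Dict Int Bool × List Int × List Int × Bool) (node : Int) :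
    PySem.Dict Int Bool × List Int × List Int × Bool :=
  (g.getD node []).foldl bInner s

def bRounds (g : PySem.Dict Int (List Int)) :
    Nat → PySem.Dict Int Bool → List Int → List Int → PySem.Dict Int Bool × List Int × List Int
  | 0, vis, reached, comp => (vis, reached, comp)
  | f + 1, vis, reached, comp =>
      let s := reached.foldl (bNode g) (vis, reached, comp, false)
      if s.2.2.2 then bRounds g f s.1 s.2.1 s.2.2.1 else (s.1, s.2.1, s.2.2.1)

def bfs_alt (graph : List (Int × List Int)) (start_node : Int) (visited : List (Int × Bool)) (cow_pos : List (Int × Int)) : Int :=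
  let g := PySem.Dict.ofList graph
  let vis := (PySem.Dict.ofList visited).insert start_node true
  let r := bRounds g ((graph.flatMap (fun e => e.2)).length + 2) vis
      (PySem.Set.ofList [start_node]) [start_node]
  let xs := r.2.2.map (fun u => ((PySem.List.pyGet? cow_pos (u - 1)).getD (0, 0)).1)
  let ys := r.2.2.map (fun u => ((PySem.List.pyGet? cow_pos (u - 1)).getD (0, 0)).2)
  2 * ((PySem.List.max? xs (fun v => v)).getD 0 - (PySem.List.min? xs (fun v => v)).getD 0) +
  2 * ((PySem.List.max? ys (fun v => v)).getD 0 - (PySem.List.min? ys (fun v => v)).getD 0)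

-- ===== PRECONDITION & SPEC =====
-- The set of nodes A's traversal marks: fixpoint of "neighbour not yet True in visited
-- (with start_node set True)" starting from start_node.  Used only to state Pre_.
def reachB (graph : List (Int × List Int)) (vis0 : PySem.Dict Int Bool) (start : Int) : List Int :=
  (List.range ((graph.flatMap (fun e => e.2)).length + 1)).foldl
    (fun S _ => S.foldl (fun T node =>
        ((((PySem.Dict.ofList graph).getD node []).filter
            (fun u => !(vis0.getD u true))).foldl PySem.Set.add T)) S)
    [start]

-- Pre_ excludes exactly the inputs on which Python A raises: a marked node missing from
-- graph (KeyError), a neighbour of a marked node missing from visited (KeyError), or a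
-- marked node whose cow_pos index is out of range (IndexError).
def Pre_bfs (graph : List (Int × List Int)) (start_node : Int) (visited : List (Int × Bool)) (cow_pos : List (Int × Int)) : Prop :=
  ∀ node ∈ reachB graph ((PySem.Dict.ofList visited).insert start_node true) start_node,
    node ∈ (PySem.Dict.ofList graph).keys ∧
    (PySem.List.pyGet? cow_pos (node - 1)).isSome = true ∧
    ∀ u ∈ (PySem.Dict.ofList graph).getD node [],
      ((PySem.Dict.ofList visited).insert start_node true).contains u = true
instance (graph : List (Int × List Int)) (start_node : Int) (visited : List (Int × Bool)) (cow_pos : List (Int × Int)) : Decidable (Pre_bfs graph start_node visited cow_pos) := by unfold Pre_bfs; infer_instance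

def pvWitness_bfs : (List (Int × List Int)) × Int × (List (Int × Bool)) × (List (Int × Int)) :=
  ([(1, [2]), (2, [1])], 1, [(1, false), (2, false)], [(0, 0), (2, 3)])

def Spec_bfs (graph : List (Int × List Int)) (start_node : Int) (visited : List (Int × Bool)) (cow_pos : List (Int × Int)) (out : Int) : Prop := out = bfs_alt graph start_node visited cow_pos
instance (graph : List (Int × List Int)) (start_node : Int) (visited : List (Int × Bool)) (cow_pos : List (Int × Int)) (out : Int) : Decidable (Spec_bfs graph start_node visited cow_pos out) := by unfold Spec_bfs; infer_instance

-- ===== CLAIM (what is proved, stated in full; the proofs are below) =====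
def Claim_equal_bfs : Prop := ∀ (graph : List (Int × List Int)) (start_node : Int) (visited : List (Int × Bool)) (cow_pos : List (Int × Int)), Dom_bfs graph start_node visited cow_pos → Pre_bfs graph start_node visited cow_pos → Spec_bfs graph start_node visited cow_pos (bfs graph start_node visited cow_pos)

-- ===== LEMMAS AND PROOFS =====

-- Abstract marking machinery used to analyse A's queue.
def markStep (s : PySem.Dict Int Bool × List Int) (u : Int) : PySem.Dict Int Bool × List Int :=
  if s.1.getD u true then s else (s.1.insert u true, s.2 ++ [u])

def levelStep (g : PySem.Dict Int (List Int)) (s : PySem.Dict Int Bool × List Int) (node : Int) :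
    PySem.Dict Int Bool × List Int :=
  (g.getD node []).foldl markStep s

def marksLevel (g : PySem.Dict Int (List Int)) (vis : PySem.Dict Int Bool) (frontier : List Int) :
    PySem.Dict Int Bool × List Int :=
  frontier.foldl (levelStep g) (vis, [])

def marksRun (g : PySem.Dict Int (List Int)) :
    Nat → PySem.Dict Int Bool → List Int → PySem.Dict Int Bool × List Int
  | 0, vis, _ => (vis, [])
  | f + 1, vis, frontier =>
      if frontier.isEmpty then (vis, [])
      else
        let s := marksLevel g vis frontier
        let t := marksRun g f s.1 s.2
        (t.1, s.2 ++ t.2)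

def cowX (cow_pos : List (Int × Int)) (u : Int) : Int :=
  ((PySem.List.pyGet? cow_pos (u - 1)).getD (0, 0)).1
def cowY (cow_pos : List (Int × Int)) (u : Int) : Int :=
  ((PySem.List.pyGet? cow_pos (u - 1)).getD (0, 0)).2

def updAcc (cow_pos : List (Int × Int)) (a : Int × Int × Int × Int) (u : Int) : Int × Int × Int × Int :=
  (min a.1 (cowX cow_pos u), min a.2.1 (cowY cow_pos u),
   max a.2.2.1 (cowX cow_pos u), max a.2.2.2 (cowY cow_pos u))

def agg (cow_pos : List (Int × Int)) (a : Int × Int × Int × Int) (m : List Int) : Int × Int × Int × Int :=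
  m.foldl (updAcc cow_pos) a

def retOf (a : Int × Int × Int × Int) : Int := 2 * (a.2.2.1 - a.1) + 2 * (a.2.2.2 - a.2.1)

def NCount (allU : List Int) (d : PySem.Dict Int Bool) : Nat :=
  (allU.filter (fun u => !(d.getD u true))).length

def upd (d : PySem.Dict Int Bool) (l : List Int) : PySem.Dict Int Bool :=
  l.foldl (fun d u => d.insert u true) d

-- the set A's run marks: reachable through not-yet-visited nodes
inductive Disc (g : PySem.Dict Int (List Int)) (vis0 : PySem.Dict Int Bool) (start : Int) : Int → Prop
  | base (u : Int) : u ∈ g.getD start [] → vis0.getD u true = false → Disc g vis0 start u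
  | step (w u : Int) : Disc g vis0 start w → u ∈ g.getD w [] → vis0.getD u true = false →
      Disc g vis0 start u

lemma upd_append (d : PySem.Dict Int Bool) (l1 l2 : List Int) :
    upd d (l1 ++ l2) = upd (upd d l1) l2 := by
  simp [upd, List.foldl_append]

lemma getD_upd (d : PySem.Dict Int Bool) (l : List Int) (u : Int) :
    (upd d l).getD u true = (decide (u ∈ l) || d.getD u true) := by
  induction l generalizing d with
  | nil => simp [upd]
  | cons x l ih =>
    show (upd (d.insert x true) l).getD u true = _
    rw [ih]
    rw [PySem.Dict.getD_insert]
    by_cases h : u = x <;> simp [h]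

lemma foldl_markStep_shift (adj : List Int) (vis : PySem.Dict Int Bool) (m : List Int) :
    adj.foldl markStep (vis, m) =
      ((adj.foldl markStep (vis, [])).1, m ++ (adj.foldl markStep (vis, [])).2) := by
  induction adj generalizing vis m with
  | nil => simp
  | cons u adj ih =>
    simp only [List.foldl_cons]
    by_cases h : vis.getD u true = true
    · rw [show markStep (vis, m) u = (vis, m) from by simp [markStep, h],
          show markStep (vis, []) u = (vis, []) from by simp [markStep, h]]
      exact ih vis m
    · rw [show markStep (vis, m) u = (vis.insert u true, m ++ [u]) from by simp [markStep, h],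
          show markStep (vis, []) u = (vis.insert u true, [] ++ [u]) from by simp [markStep, h],
          ih (vis.insert u true) (m ++ [u]), ih (vis.insert u true) ([] ++ [u])]
      simp

lemma markStep_vis (adj : List Int) (vis : PySem.Dict Int Bool) :
    (adj.foldl markStep (vis, [])).1 = upd vis (adj.foldl markStep (vis, [])).2 := by
  induction adj generalizing vis with
  | nil => simp [upd]
  | cons u adj ih =>
    simp only [List.foldl_cons]
    by_cases h : vis.getD u true = true
    · rw [show markStep (vis, []) u = (vis, []) from by simp [markStep, h]]
      exact ih vis
    · rw [show markStep (vis, []) u = (vis.insert u true, [] ++ [u]) from by simp [markStep, h]]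
      rw [foldl_markStep_shift adj (vis.insert u true) ([] ++ [u])]
      rw [ih (vis.insert u true)]
      simp [upd]

lemma mem_markStep (adj : List Int) (vis : PySem.Dict Int Bool) (x : Int) :
    x ∈ (adj.foldl markStep (vis, [])).2 ↔ x ∈ adj ∧ vis.getD x true = false := by
  induction adj generalizing vis with
  | nil => simp
  | cons u adj ih =>
    simp only [List.foldl_cons]
    by_cases h : vis.getD u true = true
    · rw [show markStep (vis, []) u = (vis, []) from by simp [markStep, h], ih]
      constructor
      · rintro ⟨hx, hv⟩; exact ⟨List.mem_cons_of_mem _ hx, hv⟩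
      · rintro ⟨hx, hv⟩
        rcases List.mem_cons.mp hx with rfl | hx
        · exact absurd hv (by simp [h])
        · exact ⟨hx, hv⟩
    · have h' : vis.getD u true = false := by
        cases hc : vis.getD u true; rfl; exact absurd hc h
      rw [show markStep (vis, []) u = (vis.insert u true, [] ++ [u]) from by simp [markStep, h],
          foldl_markStep_shift adj (vis.insert u true) ([] ++ [u])]
      simp only [List.nil_append, List.singleton_append]
      rw [List.mem_cons, ih, PySem.Dict.getD_insert]
      constructor
      · rintro (rfl | ⟨hx, hv⟩)
        · exact ⟨List.mem_cons_self, h'⟩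
        · by_cases he : x = u
          · simp [he] at hv
          · simp only [he, if_false] at hv
            exact ⟨List.mem_cons_of_mem _ hx, hv⟩
      · rintro ⟨hx, hv⟩
        by_cases he : x = u
        · exact Or.inl he
        · right
          rcases List.mem_cons.mp hx with rfl | hx
          · exact absurd rfl he
          · exact ⟨hx, by simpa [he] using hv⟩

lemma foldl_levelStep_shift (g : PySem.Dict Int (List Int)) (fr : List Int)
    (vis : PySem.Dict Int Bool) (m : List Int) :
    fr.foldl (levelStep g) (vis, m) =
      ((marksLevel g vis fr).1, m ++ (marksLevel g vis fr).2) := by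
  induction fr generalizing vis m with
  | nil => simp [marksLevel]
  | cons node fr ih =>
    simp only [List.foldl_cons, marksLevel, levelStep]
    rw [foldl_markStep_shift (g.getD node []) vis m,
        foldl_markStep_shift (g.getD node []) vis []]
    rw [ih, ih]
    simp [marksLevel]

lemma marksLevel_cons (g : PySem.Dict Int (List Int)) (vis : PySem.Dict Int Bool)
    (node : Int) (fr : List Int) :
    marksLevel g vis (node :: fr)
      = ((marksLevel g ((g.getD node []).foldl markStep (vis, [])).1 fr).1,
         ((g.getD node []).foldl markStep (vis, [])).2
           ++ (marksLevel g ((g.getD node []).foldl markStep (vis, [])).1 fr).2) := by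
  simp only [marksLevel, List.foldl_cons, levelStep]
  rw [foldl_levelStep_shift]
  rfl

lemma marksLevel_vis (g : PySem.Dict Int (List Int)) (fr : List Int) (vis : PySem.Dict Int Bool) :
    (marksLevel g vis fr).1 = upd vis (marksLevel g vis fr).2 := by
  induction fr generalizing vis with
  | nil => simp [marksLevel, upd]
  | cons node fr ih =>
    rw [marksLevel_cons]
    simp only
    rw [ih, markStep_vis, upd_append]

lemma mem_marksLevel (g : PySem.Dict Int (List Int)) (fr : List Int) (vis : PySem.Dict Int Bool)
    (x : Int) :
    x ∈ (marksLevel g vis fr).2 ↔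
      vis.getD x true = false ∧ ∃ n ∈ fr, x ∈ g.getD n [] := by
  induction fr generalizing vis with
  | nil => simp [marksLevel]
  | cons node fr ih =>
    rw [marksLevel_cons]
    simp only [List.mem_append]
    rw [ih, mem_markStep, markStep_vis, getD_upd]
    constructor
    · rintro (⟨hx, hv⟩ | ⟨hv, n, hn, hx⟩)
      · exact ⟨hv, node, List.mem_cons_self, hx⟩
      · rcases Bool.or_eq_false_iff.mp hv with ⟨_, hv'⟩
        exact ⟨hv', n, List.mem_cons_of_mem _ hn, hx⟩
    · rintro ⟨hv, n, hn, hx⟩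
      by_cases hm : x ∈ (List.foldl markStep (vis, []) (g.getD node [])).2
      · exact Or.inl ((mem_markStep _ _ _).mp hm)
      · right
        refine ⟨by simp [hm, hv], ?_⟩
        rcases List.mem_cons.mp hn with rfl | hn
        · exact absurd ((mem_markStep _ _ _).mpr ⟨hx, hv⟩) hm
        · exact ⟨n, hn, hx⟩

lemma foldl_stepA (cow_pos : List (Int × Int)) (adj : List Int) (vis : PySem.Dict Int Bool)
    (a : Int × Int × Int × Int) (q : List Int) :
    adj.foldl (bfsStepA cow_pos) (vis, a, q) =
      ((adj.foldl markStep (vis, [])).1,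
        agg cow_pos a (adj.foldl markStep (vis, [])).2,
        q ++ (adj.foldl markStep (vis, [])).2) := by
  induction adj generalizing vis a q with
  | nil => simp [agg]
  | cons u adj ih =>
    simp only [List.foldl_cons]
    by_cases h : vis.getD u true = true
    · rw [show bfsStepA cow_pos (vis, a, q) u = (vis, a, q) from by simp [bfsStepA, h],
          show markStep (vis, []) u = (vis, []) from by simp [markStep, h]]
      exact ih vis a q
    · rw [show bfsStepA cow_pos (vis, a, q) u
            = (vis.insert u true, updAcc cow_pos a u, q ++ [u]) from by
            simp [bfsStepA, updAcc, cowX, cowY, h],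
          show markStep (vis, []) u = (vis.insert u true, [] ++ [u]) from by simp [markStep, h],
          foldl_markStep_shift adj (vis.insert u true) ([] ++ [u]),
          ih (vis.insert u true) (updAcc cow_pos a u) (q ++ [u])]
      simp [agg]

lemma bfsLoopA_level (g : PySem.Dict Int (List Int)) (cow_pos : List (Int × Int)) :
    ∀ (fr : List Int) (f : Nat) (vis : PySem.Dict Int Bool) (a : Int × Int × Int × Int)
      (nxt : List Int),
    bfsLoopA g cow_pos (fr.length + f) (fr ++ nxt) vis a =
      bfsLoopA g cow_pos f (nxt ++ (marksLevel g vis fr).2) (marksLevel g vis fr).1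
        (agg cow_pos a (marksLevel g vis fr).2) := by
  intro fr
  induction fr with
  | nil => intro f vis a nxt; simp [marksLevel, agg]
  | cons node fr ih =>
    intro f vis a nxt
    have hlen : (node :: fr).length + f = (fr.length + f) + 1 := by simp; omega
    rw [hlen]
    show bfsLoopA g cow_pos ((fr.length + f) + 1) (node :: (fr ++ nxt)) vis a = _
    simp only [bfsLoopA]
    rw [foldl_stepA cow_pos (g.getD node []) vis a (fr ++ nxt)]
    have hassoc : (fr ++ nxt) ++ ((g.getD node []).foldl markStep (vis, [])).2
        = fr ++ (nxt ++ ((g.getD node []).foldl markStep (vis, [])).2) := by simp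
    simp only [hassoc]
    rw [ih]
    rw [marksLevel_cons]
    simp [agg, List.foldl_append]

lemma length_filter_update (u : Int) (p : Int → Bool) :
    ∀ (l : List Int), l.Nodup → u ∈ l → p u = true →
    (l.filter (fun x => if x = u then false else p x)).length + 1 = (l.filter p).length := by
  intro l
  induction l with
  | nil => intro _ hu _; simp at hu
  | cons x l ih =>
    intro hnd hu hp
    rcases List.nodup_cons.mp hnd with ⟨hx, hndl⟩
    by_cases hxu : x = u
    · subst hxu
      have hfc : List.filter (fun y => !decide (y = x) && p y) l = List.filter p l := by
        apply List.filter_congr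
        intro y hy
        have hyx : ¬ y = x := fun h => hx (h ▸ hy)
        simp [hyx]
      simp [hp, hfc]
    · have hul : u ∈ l := by
        rcases List.mem_cons.mp hu with h | h
        · exact absurd h.symm hxu
        · exact h
      have ihh := ih hndl hul hp
      have hfun : (fun y => if y = u then false else p y) = (fun y => !decide (y = u) && p y) := by
        funext y; by_cases h : y = u <;> simp [h]
      rw [hfun] at ihh
      cases hpx : p x with
      | true =>
        simp [hxu, hpx]
        omega
      | false =>
        simp [hxu, hpx]
        exact ihh

lemma NCount_insert (allU : List Int) (hnd : allU.Nodup) (d : PySem.Dict Int Bool) (u : Int)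
    (hu : u ∈ allU) (h : d.getD u true = false) :
    NCount allU (d.insert u true) + 1 = NCount allU d := by
  unfold NCount
  have hfc : allU.filter (fun x => !((d.insert u true).getD x true))
      = allU.filter (fun x => if x = u then false else !(d.getD x true)) := by
    apply List.filter_congr
    intro x _
    rw [PySem.Dict.getD_insert]
    by_cases hx : x = u <;> simp [hx]
  rw [hfc]
  exact length_filter_update u (fun x => !(d.getD x true)) allU hnd hu (by simp [h])

lemma fc_fold_markStep (allU : List Int) (hnd : allU.Nodup) :
    ∀ (adj : List Int), (∀ u ∈ adj, u ∈ allU) → ∀ (vis : PySem.Dict Int Bool) (m : List Int),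
    NCount allU ((adj.foldl markStep (vis, m)).1) + (adj.foldl markStep (vis, m)).2.length
      = NCount allU vis + m.length := by
  intro adj
  induction adj with
  | nil => intro _ vis m; simp
  | cons u adj ih =>
    intro hsub vis m
    simp only [List.foldl_cons]
    by_cases h : vis.getD u true = true
    · rw [show markStep (vis, m) u = (vis, m) from by simp [markStep, h]]
      exact ih (fun x hx => hsub x (List.mem_cons_of_mem u hx)) vis m
    · rw [show markStep (vis, m) u = (vis.insert u true, m ++ [u]) from by simp [markStep, h]]
      have h' : vis.getD u true = false := by
        cases hc : vis.getD u true
        · rfl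
        · exact absurd hc h
      have hc := NCount_insert allU hnd vis u (hsub u List.mem_cons_self) h'
      have := ih (fun x hx => hsub x (List.mem_cons_of_mem u hx)) (vis.insert u true) (m ++ [u])
      simp only [List.length_append, List.length_cons, List.length_nil] at this ⊢
      omega

lemma fc_level (g : PySem.Dict Int (List Int)) (allU : List Int) (hnd : allU.Nodup)
    (hadj : ∀ node : Int, ∀ u ∈ g.getD node [], u ∈ allU) :
    ∀ (fr : List Int) (vis : PySem.Dict Int Bool) (m : List Int),
    NCount allU ((fr.foldl (levelStep g) (vis, m)).1) + (fr.foldl (levelStep g) (vis, m)).2.length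
      = NCount allU vis + m.length := by
  intro fr
  induction fr with
  | nil => intro vis m; simp
  | cons node fr ih =>
    intro vis m
    simp only [List.foldl_cons, levelStep]
    have h1 := fc_fold_markStep allU hnd (g.getD node []) (hadj node) vis m
    have h2 := ih ((g.getD node []).foldl markStep (vis, m)).1
      ((g.getD node []).foldl markStep (vis, m)).2
    rw [show (g.getD node []).foldl markStep (vis, m)
        = (((g.getD node []).foldl markStep (vis, m)).1,
           ((g.getD node []).foldl markStep (vis, m)).2) from rfl]
    omega

lemma marksRun_nil (g : PySem.Dict Int (List Int)) (f : Nat) (vis : PySem.Dict Int Bool) :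
    marksRun g f vis [] = (vis, []) := by
  cases f <;> simp [marksRun]

lemma main_sim (g : PySem.Dict Int (List Int)) (cow_pos : List (Int × Int)) (allU : List Int)
    (hnd : allU.Nodup) (hadj : ∀ node : Int, ∀ u ∈ g.getD node [], u ∈ allU) :
    ∀ (fB : Nat) (fr : List Int) (fA : Nat) (vis : PySem.Dict Int Bool) (a : Int × Int × Int × Int),
    fr.length + NCount allU vis + 1 ≤ fA → NCount allU vis + 1 ≤ fB →
    bfsLoopA g cow_pos fA fr vis a = retOf (agg cow_pos a (marksRun g fB vis fr).2) := by
  intro fB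
  induction fB with
  | zero => intro fr fA vis a h1 h2; omega
  | succ fB ih =>
    intro fr fA vis a h1 h2
    cases fr with
    | nil =>
      rw [marksRun_nil]
      cases fA with
      | zero => simp at h1
      | succ fA => simp [bfsLoopA, agg, retOf]
    | cons node rest =>
      have hfuel : fA = (node :: rest).length + (fA - (node :: rest).length) := by
        simp at h1 ⊢; omega
      have hlev : bfsLoopA g cow_pos ((node :: rest).length + (fA - (node :: rest).length))
            (node :: rest) vis a
          = bfsLoopA g cow_pos (fA - (node :: rest).length) (marksLevel g vis (node :: rest)).2
              (marksLevel g vis (node :: rest)).1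
              (agg cow_pos a (marksLevel g vis (node :: rest)).2) := by
        have := bfsLoopA_level g cow_pos (node :: rest) (fA - (node :: rest).length) vis a []
        simpa using this
      rw [hfuel, hlev]
      have hfc : NCount allU (marksLevel g vis (node :: rest)).1
          + (marksLevel g vis (node :: rest)).2.length = NCount allU vis + 0 := by
        have := fc_level g allU hnd hadj (node :: rest) vis []
        simpa [marksLevel] using this
      have hrun : marksRun g (fB + 1) vis (node :: rest)
          = ((marksRun g fB (marksLevel g vis (node :: rest)).1
                (marksLevel g vis (node :: rest)).2).1,
             (marksLevel g vis (node :: rest)).2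
               ++ (marksRun g fB (marksLevel g vis (node :: rest)).1
                    (marksLevel g vis (node :: rest)).2).2) := by
        simp [marksRun]
      rw [hrun]
      by_cases hm : (marksLevel g vis (node :: rest)).2 = []
      · rw [hm, marksRun_nil]
        have hf1 : 1 ≤ fA - (node :: rest).length := by simp at h1 ⊢; omega
        cases hfa : fA - (node :: rest).length with
        | zero => omega
        | succ f' => simp [bfsLoopA, agg, retOf]
      · have hml : 1 ≤ (marksLevel g vis (node :: rest)).2.length := by
          cases hmm : (marksLevel g vis (node :: rest)).2
          · exact absurd hmm hm
          · simp
        have hrec := ih (marksLevel g vis (node :: rest)).2 (fA - (node :: rest).length)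
          (marksLevel g vis (node :: rest)).1
          (agg cow_pos a (marksLevel g vis (node :: rest)).2)
          (by simp at h1 ⊢; omega) (by omega)
        rw [hrec]
        simp [agg, List.foldl_append]

-- soundness of the run's marks
lemma run_sound (g : PySem.Dict Int (List Int)) (vis0 : PySem.Dict Int Bool) (start : Int) :
    ∀ (fuel : Nat) (fr M0 : List Int),
    (∀ n ∈ fr, n = start ∨ Disc g vis0 start n) →
    (∀ n ∈ M0, Disc g vis0 start n) →
    ∀ u ∈ (marksRun g fuel (upd vis0 M0) fr).2, Disc g vis0 start u := by
  intro fuel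
  induction fuel with
  | zero => intro fr M0 _ _ u hu; simp [marksRun] at hu
  | succ f ih =>
    intro fr M0 hfr hM0 u hu
    by_cases hfe : fr.isEmpty
    · simp [marksRun, hfe] at hu
    · simp only [marksRun, hfe, Bool.false_eq_true, if_neg, not_false_eq_true] at hu
      rcases List.mem_append.mp hu with hu | hu
      · -- marked in this level
        rcases (mem_marksLevel g fr (upd vis0 M0) u).mp hu with ⟨hv, n, hn, he⟩
        rw [getD_upd] at hv
        rcases Bool.or_eq_false_iff.mp hv with ⟨_, hv0⟩
        rcases hfr n hn with rfl | hD
        · exact Disc.base u he hv0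
        · exact Disc.step n u hD he hv0
      · -- marked later
        have hnew : ∀ n ∈ (marksLevel g (upd vis0 M0) fr).2, Disc g vis0 start n := by
          intro n hn
          rcases (mem_marksLevel g fr (upd vis0 M0) n).mp hn with ⟨hv, n', hn', he⟩
          rw [getD_upd] at hv
          rcases Bool.or_eq_false_iff.mp hv with ⟨_, hv0⟩
          rcases hfr n' hn' with rfl | hD
          · exact Disc.base n he hv0
          · exact Disc.step n' n hD he hv0
        have hvis : (marksLevel g (upd vis0 M0) fr).1
            = upd vis0 (M0 ++ (marksLevel g (upd vis0 M0) fr).2) := by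
          rw [marksLevel_vis, upd_append]
        rw [hvis] at hu
        exact ih _ _ (fun n hn => Or.inr (hnew n hn))
          (fun n hn => (List.mem_append.mp hn).elim (hM0 n) (hnew n)) u hu

-- closedness of the run's marks at termination
lemma run_complete (g : PySem.Dict Int (List Int)) (allU : List Int) (hnd : allU.Nodup)
    (hadj : ∀ node : Int, ∀ u ∈ g.getD node [], u ∈ allU) :
    ∀ (fuel : Nat) (fr : List Int) (vis : PySem.Dict Int Bool),
    NCount allU vis + 1 ≤ fuel →
    ∀ n, (n ∈ fr ∨ n ∈ (marksRun g fuel vis fr).2) →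
    ∀ u ∈ g.getD n [], vis.getD u true = false → u ∈ (marksRun g fuel vis fr).2 := by
  intro fuel
  induction fuel with
  | zero => intro fr vis h1; omega
  | succ f ih =>
    intro fr vis h1 n hn u hu hv
    by_cases hfe : fr.isEmpty
    · rcases hn with hn | hn
      · rw [List.isEmpty_iff.mp hfe] at hn; simp at hn
      · simp [marksRun, hfe] at hn
    · simp only [marksRun, hfe, Bool.false_eq_true, if_neg, not_false_eq_true] at hn ⊢
      set N := (marksLevel g vis fr).2 with hN
      have hvis1 : (marksLevel g vis fr).1 = upd vis N := marksLevel_vis g fr vis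
      by_cases huN : u ∈ N
      · exact List.mem_append.mpr (Or.inl huN)
      · -- u must come from the recursive run
        have hu1 : (upd vis N).getD u true = false := by
          rw [getD_upd]; simp [huN, hv]
        have hnN : n ∈ N ∨ n ∈ (marksRun g f (marksLevel g vis fr).1 N).2 := by
          rcases hn with hn | hn
          · -- n in the frontier: u would have been marked this level
            exact absurd ((mem_marksLevel g fr vis u).mpr ⟨hv, n, hn, hu⟩) huN
          · rcases List.mem_append.mp hn with hn | hn
            · exact Or.inl hn
            · exact Or.inr hn
        by_cases hNe : N = []
        · rw [hNe, marksRun_nil] at hnN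
          simp at hnN
        · have hlen : 0 < N.length := List.length_pos_of_ne_nil hNe
          have hfc : NCount allU (marksLevel g vis fr).1 + N.length = NCount allU vis := by
            have := fc_level g allU hnd hadj fr vis []
            simpa [marksLevel, ← hN] using this
          have hf : NCount allU (marksLevel g vis fr).1 + 1 ≤ f := by omega
          have := ih N (marksLevel g vis fr).1 hf n hnN u hu (by rw [hvis1]; exact hu1)
          exact List.mem_append.mpr (Or.inr this)

lemma marksA_iff (g : PySem.Dict Int (List Int)) (vis0 : PySem.Dict Int Bool) (start : Int)
    (allU : List Int) (hnd : allU.Nodup)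
    (hadj : ∀ node : Int, ∀ u ∈ g.getD node [], u ∈ allU)
    (fuel : Nat) (hfuel : NCount allU vis0 + 1 ≤ fuel) :
    ∀ u, u ∈ (marksRun g fuel vis0 [start]).2 ↔ Disc g vis0 start u := by
  intro u
  constructor
  · intro hu
    have h0 : upd vis0 ([] : List Int) = vis0 := rfl
    exact run_sound g vis0 start fuel [start] []
      (fun n hn => Or.inl (by simpa using hn)) (by simp) u (by rw [h0]; exact hu)
  · intro hD
    induction hD with
    | base v he hv =>
      exact run_complete g allU hnd hadj fuel [start] vis0 hfuel start
        (Or.inl List.mem_cons_self) v he hv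
    | step w v _ he hv ihw =>
      exact run_complete g allU hnd hadj fuel [start] vis0 hfuel w (Or.inr ihw) v he hv

-- ===== B-side: invariant and pass analysis =====
def InvB (g : PySem.Dict Int (List Int)) (vis0 : PySem.Dict Int Bool) (start : Int)
    (allU : List Int) (vis : PySem.Dict Int Bool) (reached comp : List Int) : Prop :=
  ∃ M : List Int,
    comp = start :: M ∧
    vis = upd vis0 M ∧
    (∀ x : Int, x ∈ reached ↔ x ∈ comp) ∧
    (∀ u ∈ M, Disc g vis0 start u ∧ u ∈ allU)

lemma bInner_fold (g : PySem.Dict Int (List Int)) (vis0 : PySem.Dict Int Bool) (start : Int)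
    (allU : List Int) (hnd : allU.Nodup) (node : Int)
    (hD : node = start ∨ Disc g vis0 start node) :
    ∀ (adj : List Int), (∀ u ∈ adj, u ∈ g.getD node []) → (∀ u ∈ adj, u ∈ allU) →
    ∀ (s : PySem.Dict Int Bool × List Int × List Int × Bool),
    InvB g vis0 start allU s.1 s.2.1 s.2.2.1 →
    InvB g vis0 start allU (adj.foldl bInner s).1 (adj.foldl bInner s).2.1
        (adj.foldl bInner s).2.2.1 ∧
    NCount allU (adj.foldl bInner s).1 + (adj.foldl bInner s).2.2.1.length
      = NCount allU s.1 + s.2.2.1.length ∧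
    s.2.2.1.length ≤ (adj.foldl bInner s).2.2.1.length ∧
    (adj.foldl bInner s).2.2.2
      = (s.2.2.2 || decide ((adj.foldl bInner s).2.2.1.length ≠ s.2.2.1.length)) ∧
    ((adj.foldl bInner s).2.2.2 = false →
      adj.foldl bInner s = s ∧ ∀ u ∈ adj, s.1.getD u true = true) := by
  intro adj
  induction adj with
  | nil =>
    intro _ _ s hs
    refine ⟨hs, rfl, le_refl _, by simp, ?_⟩
    intro _; exact ⟨rfl, by simp⟩
  | cons u adj ih =>
    intro hsub hsubU s hs
    simp only [List.foldl_cons]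
    by_cases h : s.1.getD u true = true
    · have hid : bInner s u = s := by simp [bInner, h]
      simp only [hid]
      obtain ⟨I1, C1, L1, F1, E1⟩ := ih (fun x hx => hsub x (List.mem_cons_of_mem u hx))
        (fun x hx => hsubU x (List.mem_cons_of_mem u hx)) s hs
      refine ⟨I1, C1, L1, F1, ?_⟩
      intro hch
      obtain ⟨heq, hall⟩ := E1 hch
      refine ⟨heq, ?_⟩
      intro x hx
      rcases List.mem_cons.mp hx with rfl | hx
      · exact h
      · exact hall x hx
    · have h' : s.1.getD u true = false := by
        cases hc : s.1.getD u true; rfl; exact absurd hc h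
      have hmark : bInner s u = (s.1.insert u true, PySem.Set.add s.2.1 u, s.2.2.1 ++ [u], true) := by
        simp [bInner, h]
      simp only [hmark]
      obtain ⟨M, hcomp, hvis, hre, hM⟩ := hs
      have hvF : vis0.getD u true = false ∧ u ∉ M := by
        rw [hvis, getD_upd] at h'
        rcases Bool.or_eq_false_iff.mp h' with ⟨hm, hv⟩
        exact ⟨hv, by simpa using hm⟩
      have hDu : Disc g vis0 start u := by
        rcases hD with rfl | hDn
        · exact Disc.base u (hsub u List.mem_cons_self) hvF.1
        · exact Disc.step node u hDn (hsub u List.mem_cons_self) hvF.1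
      have hs' : InvB g vis0 start allU (s.1.insert u true) (PySem.Set.add s.2.1 u)
          (s.2.2.1 ++ [u]) := by
        refine ⟨M ++ [u], by rw [hcomp]; simp, ?_, ?_, ?_⟩
        · rw [upd_append, ← hvis]; simp [upd]
        · intro x
          rw [PySem.Set.mem_add, List.mem_append, hre]
          simp
        · intro x hx
          rcases List.mem_append.mp hx with hx | hx
          · exact hM x hx
          · rw [List.mem_singleton.mp hx]
            exact ⟨hDu, hsubU u List.mem_cons_self⟩
      obtain ⟨I1, C1, L1, F1, E1⟩ := ih (fun x hx => hsub x (List.mem_cons_of_mem u hx))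
        (fun x hx => hsubU x (List.mem_cons_of_mem u hx))
        (s.1.insert u true, PySem.Set.add s.2.1 u, s.2.2.1 ++ [u], true) hs'
      have hcnt : NCount allU (s.1.insert u true) + 1 = NCount allU s.1 :=
        NCount_insert allU hnd s.1 u (hsubU u List.mem_cons_self) h'
      simp only [List.length_append, List.length_cons, List.length_nil] at C1 L1
      refine ⟨I1, ?_, ?_, ?_, ?_⟩
      · omega
      · omega
      · rw [F1]
        have hne : (adj.foldl bInner (s.1.insert u true, PySem.Set.add s.2.1 u,
            s.2.2.1 ++ [u], true)).2.2.1.length ≠ s.2.2.1.length := by omega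
        simp [hne]
      · intro hch
        rw [hch] at F1
        simp at F1

lemma bNode_fold (g : PySem.Dict Int (List Int)) (vis0 : PySem.Dict Int Bool) (start : Int)
    (allU : List Int) (hnd : allU.Nodup)
    (hadjU : ∀ node : Int, ∀ u ∈ g.getD node [], u ∈ allU) :
    ∀ (nodes : List Int), (∀ n ∈ nodes, n = start ∨ Disc g vis0 start n) →
    ∀ (s : PySem.Dict Int Bool × List Int × List Int × Bool),
    InvB g vis0 start allU s.1 s.2.1 s.2.2.1 →
    InvB g vis0 start allU (nodes.foldl (bNode g) s).1 (nodes.foldl (bNode g) s).2.1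
        (nodes.foldl (bNode g) s).2.2.1 ∧
    NCount allU (nodes.foldl (bNode g) s).1 + (nodes.foldl (bNode g) s).2.2.1.length
      = NCount allU s.1 + s.2.2.1.length ∧
    s.2.2.1.length ≤ (nodes.foldl (bNode g) s).2.2.1.length ∧
    (nodes.foldl (bNode g) s).2.2.2
      = (s.2.2.2 || decide ((nodes.foldl (bNode g) s).2.2.1.length ≠ s.2.2.1.length)) ∧
    ((nodes.foldl (bNode g) s).2.2.2 = false →
      nodes.foldl (bNode g) s = s ∧
      ∀ n ∈ nodes, ∀ u ∈ g.getD n [], s.1.getD u true = true) := by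
  intro nodes
  induction nodes with
  | nil =>
    intro _ s hs
    refine ⟨hs, rfl, le_refl _, by simp, ?_⟩
    intro _; exact ⟨rfl, by simp⟩
  | cons n nodes ih =>
    intro hD s hs
    simp only [List.foldl_cons, bNode]
    obtain ⟨I1, C1, L1, F1, E1⟩ := bInner_fold g vis0 start allU hnd n
      (hD n List.mem_cons_self) (g.getD n []) (fun _ hu => hu) (hadjU n) s hs
    obtain ⟨I2, C2, L2, F2, E2⟩ := ih (fun q hq => hD q (List.mem_cons_of_mem n hq))
      ((g.getD n []).foldl bInner s) I1
    refine ⟨I2, by omega, by omega, ?_, ?_⟩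
    · rw [F2, F1]
      by_cases hb : s.2.2.2
      · simp [hb]
      · simp only [hb, Bool.false_or]
        by_cases h1 : ((g.getD n []).foldl bInner s).2.2.1.length = s.2.2.1.length
        · simp [h1]
        · have h2 : (nodes.foldl (bNode g) ((g.getD n []).foldl bInner s)).2.2.1.length
              ≠ s.2.2.1.length := by omega
          have h1' : ((g.getD n []).foldl bInner s).2.2.1.length ≠ s.2.2.1.length := h1
          simp [h1', h2]
    · intro hch
      have hf2 : ((g.getD n []).foldl bInner s).2.2.2 = false := by
        rw [hch] at F2
        rcases Bool.or_eq_false_iff.mp F2.symm with ⟨h1, _⟩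
        exact h1
      obtain ⟨heq, hall⟩ := E1 hf2
      rw [heq] at E2 hch
      obtain ⟨heq2, hall2⟩ := E2 hch
      refine ⟨by rw [heq, heq2], ?_⟩
      intro q hq u hu
      rcases List.mem_cons.mp hq with rfl | hq
      · exact hall u hu
      · exact hall2 q hq u hu

lemma bRounds_spec (g : PySem.Dict Int (List Int)) (vis0 : PySem.Dict Int Bool) (start : Int)
    (allU : List Int) (hnd : allU.Nodup)
    (hadjU : ∀ node : Int, ∀ u ∈ g.getD node [], u ∈ allU) :
    ∀ (fuel : Nat) (vis : PySem.Dict Int Bool) (reached comp : List Int),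
    InvB g vis0 start allU vis reached comp →
    NCount allU vis + 1 ≤ fuel →
    InvB g vis0 start allU (bRounds g fuel vis reached comp).1
        (bRounds g fuel vis reached comp).2.1 (bRounds g fuel vis reached comp).2.2 ∧
    (∀ n ∈ (bRounds g fuel vis reached comp).2.1, ∀ u ∈ g.getD n [],
        (bRounds g fuel vis reached comp).1.getD u true = true) := by
  intro fuel
  induction fuel with
  | zero => intro vis reached comp _ h; omega
  | succ f ih =>
    intro vis reached comp hInv hfuel
    have hsrc : ∀ n ∈ reached, n = start ∨ Disc g vis0 start n := by
      obtain ⟨M, hcomp, _, hre, hM⟩ := hInv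
      intro n hn
      have : n ∈ comp := (hre n).mp hn
      rw [hcomp] at this
      rcases List.mem_cons.mp this with h | h
      · exact Or.inl h
      · exact Or.inr (hM n h).1
    obtain ⟨I1, C1, L1, F1, E1⟩ := bNode_fold g vis0 start allU hnd hadjU reached hsrc
      (vis, reached, comp, false) hInv
    simp only [bRounds]
    by_cases hch : (reached.foldl (bNode g) (vis, reached, comp, false)).2.2.2 = true
    · rw [if_pos hch]
      have hne : (reached.foldl (bNode g) (vis, reached, comp, false)).2.2.1.length
          ≠ comp.length := by
        rw [hch] at F1
        simpa using F1.symm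
      simp only at C1 L1
      exact ih _ _ _ I1 (by omega)
    · have hch' : (reached.foldl (bNode g) (vis, reached, comp, false)).2.2.2 = false := by
        cases hb : (reached.foldl (bNode g) (vis, reached, comp, false)).2.2.2
        · rfl
        · exact absurd hb hch
      rw [if_neg (by rw [hch']; simp)]
      obtain ⟨heq, hall⟩ := E1 hch'
      rw [heq]
      exact ⟨hInv, hall⟩

lemma mem_items_foldl_insert (p : Int × List Int) :
    ∀ (l : List (Int × List Int)) (d : PySem.Dict Int (List Int)),
    p ∈ (l.foldl (fun d q => d.insert q.1 q.2) d).items → p ∈ d.items ∨ p ∈ l := by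
  intro l
  induction l with
  | nil => intro d h; exact Or.inl h
  | cons q l ih =>
    intro d h
    rcases ih (d.insert q.1 q.2) h with h' | h'
    · rcases (PySem.Dict.mem_items_insert d q.1 q.2 p).mp h' with h'' | h''
      · right
        rw [show (q.1, q.2) = q from rfl] at h''
        exact h'' ▸ List.mem_cons_self
      · exact Or.inl h''.1
    · exact Or.inr (List.mem_cons_of_mem q h')

-- foldl min / max depend only on the set of elements together with the seed
lemma foldl_min_congr (l1 l2 : List Int) (i : Int) (h : ∀ x, x ∈ l1 ↔ x ∈ l2) :
    l1.foldl min i = l2.foldl min i := by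
  have e1 := PySem.List.min?_id_cons i l1
  have e2 := PySem.List.min?_id_cons i l2
  have hm : ∀ x, x ∈ i :: l1 ↔ x ∈ i :: l2 := by
    intro x
    rw [List.mem_cons, List.mem_cons, h]
  apply le_antisymm
  · exact PySem.List.min?_isMin e1 _ ((hm _).mpr (PySem.List.min?_mem e2))
  · exact PySem.List.min?_isMin e2 _ ((hm _).mp (PySem.List.min?_mem e1))

lemma foldl_max_congr (l1 l2 : List Int) (i : Int) (h : ∀ x, x ∈ l1 ↔ x ∈ l2) :
    l1.foldl max i = l2.foldl max i := by
  have e1 := PySem.List.max?_id_cons i l1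
  have e2 := PySem.List.max?_id_cons i l2
  have hm : ∀ x, x ∈ i :: l1 ↔ x ∈ i :: l2 := by
    intro x
    rw [List.mem_cons, List.mem_cons, h]
  apply le_antisymm
  · exact PySem.List.max?_isMax e2 _ ((hm _).mp (PySem.List.max?_mem e1))
  · exact PySem.List.max?_isMax e1 _ ((hm _).mpr (PySem.List.max?_mem e2))

lemma agg_eq (cow_pos : List (Int × Int)) :
    ∀ (M : List Int) (a : Int × Int × Int × Int),
    agg cow_pos a M = ((M.map (cowX cow_pos)).foldl min a.1, (M.map (cowY cow_pos)).foldl min a.2.1,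
      (M.map (cowX cow_pos)).foldl max a.2.2.1, (M.map (cowY cow_pos)).foldl max a.2.2.2) := by
  intro M
  induction M with
  | nil => intro a; rfl
  | cons u M ih =>
    intro a
    simp only [agg, List.foldl_cons, List.map_cons]
    exact ih (updAcc cow_pos a u)

-- ===== VERDICT (by name: the statement is the Claim_ definition above) =====
theorem bfs_spec : Claim_equal_bfs := by
  intro graph start_node visited cow_pos _ _
  unfold Spec_bfs bfs bfs_alt
  dsimp only
  set g := PySem.Dict.ofList graph with hg
  set vis0 := (PySem.Dict.ofList visited).insert start_node true with hvis0
  set allU := PySem.List.dedup (graph.flatMap (fun e => e.2)) with hallU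
  set fuel := (graph.flatMap (fun e => e.2)).length + 2 with hfuel
  have hnd : allU.Nodup := PySem.List.nodup_dedup _
  have hadj : ∀ (node u : Int), u ∈ g.getD node [] → u ∈ allU := by
    intro node u hu
    cases hgq : g.get? node with
    | none =>
      rw [PySem.Dict.getD_eq_get?_getD, hgq] at hu
      simp at hu
    | some adj =>
      have hitem := PySem.Dict.mem_items_of_get?_eq_some g hgq
      have h0 : (node, adj) ∈ PySem.Dict.empty.items ∨ (node, adj) ∈ graph :=
        mem_items_foldl_insert (node, adj) graph PySem.Dict.empty hitem
      have hin : (node, adj) ∈ graph := by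
        rcases h0 with h0 | h0
        · simp [PySem.Dict.empty] at h0
        · exact h0
      have hu' : u ∈ adj := by
        rw [PySem.Dict.getD_eq_get?_getD, hgq] at hu
        simpa using hu
      rw [hallU, PySem.List.mem_dedup]
      exact List.mem_flatMap.mpr ⟨(node, adj), hin, hu'⟩
  have hNle : NCount allU vis0 ≤ (graph.flatMap (fun e => e.2)).length := by
    have h1 : allU.length ≤ (graph.flatMap (fun e => e.2)).length := by
      rw [hallU, PySem.List.dedup_eq_ofList]
      exact PySem.Set.length_ofList_le _
    exact le_trans (List.length_filter_le _ _) h1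
  -- A's loop value in terms of the marks of the abstract run
  have hA := main_sim g cow_pos allU hnd hadj fuel [start_node] fuel vis0
    (((PySem.List.pyGet? cow_pos (start_node - 1)).getD (0, 0)).1,
     ((PySem.List.pyGet? cow_pos (start_node - 1)).getD (0, 0)).2,
     ((PySem.List.pyGet? cow_pos (start_node - 1)).getD (0, 0)).1,
     ((PySem.List.pyGet? cow_pos (start_node - 1)).getD (0, 0)).2)
    (by simp only [List.length_cons, List.length_nil]; omega) (by omega)
  have hAiff := marksA_iff g vis0 start_node allU hnd hadj fuel (by omega)
  -- B's rounds: invariant and closedness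
  have hInv0 : InvB g vis0 start_node allU vis0 (PySem.Set.ofList [start_node]) [start_node] := by
    refine ⟨[], rfl, rfl, ?_, by simp⟩
    intro x
    constructor
    · intro hx
      simpa using (PySem.Set.mem_ofList [start_node] x).mp hx
    · intro hx
      exact (PySem.Set.mem_ofList [start_node] x).mpr hx
  obtain ⟨hBInv, hBclosed⟩ := bRounds_spec g vis0 start_node allU hnd hadj
    fuel vis0 (PySem.Set.ofList [start_node]) [start_node] hInv0 (by omega)
  obtain ⟨MB, hcompB, hvisB, hreB, hMB⟩ := hBInv
  -- completeness of B: every discovered node is collected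
  have hBC : ∀ u, Disc g vis0 start_node u → u ∈ MB := by
    intro u hD
    induction hD with
    | base v he hv =>
      have hrs : start_node ∈ (bRounds g fuel vis0
          (PySem.Set.ofList [start_node]) [start_node]).2.1 := by
        refine (hreB start_node).mpr ?_
        rw [hcompB]
        exact List.mem_cons_self
      have := hBclosed start_node hrs v he
      rw [hvisB, getD_upd] at this
      rcases Bool.or_eq_true_iff.mp this with h | h
      · simpa using h
      · rw [h] at hv; cases hv
    | step w v _ he hv ihw =>
      have hrs : w ∈ (bRounds g fuel vis0
          (PySem.Set.ofList [start_node]) [start_node]).2.1 := by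
        refine (hreB w).mpr ?_
        rw [hcompB]
        exact List.mem_cons_of_mem _ ihw
      have := hBclosed w hrs v he
      rw [hvisB, getD_upd] at this
      rcases Bool.or_eq_true_iff.mp this with h | h
      · simpa using h
      · rw [h] at hv; cases hv
  have hMM : ∀ x, x ∈ (marksRun g fuel vis0 [start_node]).2 ↔ x ∈ MB := by
    intro x
    exact (hAiff x).trans ⟨hBC x, fun hx => (hMB x hx).1⟩
  rw [hA, agg_eq, hcompB]
  simp only [List.map_cons, PySem.List.min?_id_cons, PySem.List.max?_id_cons, Option.getD_some,
    retOf]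
  have hmapX : ∀ x, x ∈ (marksRun g fuel vis0 [start_node]).2.map (cowX cow_pos)
      ↔ x ∈ MB.map (cowX cow_pos) := by
    intro x
    simp only [List.mem_map]
    exact exists_congr fun u => and_congr_left fun _ => hMM u
  have hmapY : ∀ x, x ∈ (marksRun g fuel vis0 [start_node]).2.map (cowY cow_pos)
      ↔ x ∈ MB.map (cowY cow_pos) := by
    intro x
    simp only [List.mem_map]
    exact exists_congr fun u => and_congr_left fun _ => hMM u
  rw [foldl_min_congr _ _ _ hmapX, foldl_max_congr _ _ _ hmapX,
      foldl_min_congr _ _ _ hmapY, foldl_max_congr _ _ _ hmapY]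
  rfl
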